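-- pv_equiv track=rewrite | github.com/vkondrasu/faang | DynamicProgramming/GameScoreCombinations.py | scoring_optionsDPIterative
-- ===== SOURCE A (Python) =====
-- def scoring_optionsDPIterative(n):
--     pass
--     result = [0,1,2,3,6]
--
--     if n<= 0:
--         return 0
--
--     if n <= 4:
--         return result[n]
--
--     for i in range(5,n+1):
--         result.append(result[i-4] + result[i-2] + result[i-1])
--
--     return result[-1]
-- ===== SOURCE B (Python) =====
-- def scoring_optionsDPIterative(n):
--     # O(log n) matrix exponentiation of f(i) = f(i-1) + f(i-2) + f(i-4)
--     if n <= 0: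
--         return 0
--     if n <= 4:
--         return (0, 1, 2, 3, 6)[n]
--
--     def mat_mul(A, B):
--         return tuple(
--             tuple(sum(A[i][k] * B[k][j] for k in range(4)) for j in range(4))
--             for i in range(4)
--         )
--
--     M = ((1, 1, 0, 1), (1, 0, 0, 0), (0, 1, 0, 0), (0, 0, 1, 0))
--     P = ((1, 0, 0, 0), (0, 1, 0, 0), (0, 0, 1, 0), (0, 0, 0, 1))
--     base = M
--     k = n - 4
--     while k:
--         if k & 1:
--             P = mat_mul(P, base)
--         base = mat_mul(base, base)
--         k >>= 1
--     v = (6, 3, 2, 1)  # (f(4), f(3), f(2), f(1))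
--     return sum(P[0][j] * v[j] for j in range(4))
-- ===== Notes on version B (the rewrite author's own statement) =====
-- stated objective: faster
-- what changed: Replaced the O(n) list-building DP with O(log n) binary matrix exponentiation of the linear recurrence f(i)=f(i-1)+f(i-2)+f(i-4); intended as faster, measured 3.27x at the largest size both finished.
import Mathlib
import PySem

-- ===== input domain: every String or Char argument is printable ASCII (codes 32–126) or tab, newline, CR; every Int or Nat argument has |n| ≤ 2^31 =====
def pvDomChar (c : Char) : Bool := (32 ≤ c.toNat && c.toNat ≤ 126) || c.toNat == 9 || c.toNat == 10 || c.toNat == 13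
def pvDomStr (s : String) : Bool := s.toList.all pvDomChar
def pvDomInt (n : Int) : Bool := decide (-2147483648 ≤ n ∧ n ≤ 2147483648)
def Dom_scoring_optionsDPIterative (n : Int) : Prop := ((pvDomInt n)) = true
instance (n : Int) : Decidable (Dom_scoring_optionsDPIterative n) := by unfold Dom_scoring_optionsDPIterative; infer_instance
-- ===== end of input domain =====

-- B replaces A's list DP by binary matrix exponentiation of the same recurrence (intended as faster; measured 3.27x at the largest size both finished).

-- ===== PORT A =====
-- Literal port of A: build result=[0,1,2,3,6], append result[i-4]+result[i-2]+result[i-1]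
-- for i in range(5, n+1), return result[-1].  All indexings are in range, so pyGetD is exact here.
def scoring_optionsDPIterative (n : Int) : Int :=
  let result : List Int := [0, 1, 2, 3, 6]
  if n ≤ 0 then 0
  else if n ≤ 4 then PySem.List.pyGetD result n 0
  else
    let result := (PySem.List.pyRange 5 (n + 1) 1).foldl
      (fun res i =>
        res ++ [PySem.List.pyGetD res (i - 4) 0 + PySem.List.pyGetD res (i - 2) 0 +
                PySem.List.pyGetD res (i - 1) 0]) result
    PySem.List.pyGetD result (-1) 0

-- ===== PORT B =====
-- 4-vectors and 4×4 matrices as tuples, mirroring Source B's tuples.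
def pvDot (u v : Int × Int × Int × Int) : Int :=
  u.1 * v.1 + u.2.1 * v.2.1 + u.2.2.1 * v.2.2.1 + u.2.2.2 * v.2.2.2

-- row·matrix product (the inner comprehension of Source B's mat_mul)
def pvRowMul (u : (Int × Int × Int × Int))
    (B : (Int × Int × Int × Int) × (Int × Int × Int × Int) × (Int × Int × Int × Int) × (Int × Int × Int × Int)) :
    Int × Int × Int × Int :=
  (u.1 * B.1.1 + u.2.1 * B.2.1.1 + u.2.2.1 * B.2.2.1.1 + u.2.2.2 * B.2.2.2.1,
   u.1 * B.1.2.1 + u.2.1 * B.2.1.2.1 + u.2.2.1 * B.2.2.1.2.1 + u.2.2.2 * B.2.2.2.2.1,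
   u.1 * B.1.2.2.1 + u.2.1 * B.2.1.2.2.1 + u.2.2.1 * B.2.2.1.2.2.1 + u.2.2.2 * B.2.2.2.2.2.1,
   u.1 * B.1.2.2.2 + u.2.1 * B.2.1.2.2.2 + u.2.2.1 * B.2.2.1.2.2.2 + u.2.2.2 * B.2.2.2.2.2.2)

def pvMatMul (A B : (Int × Int × Int × Int) × (Int × Int × Int × Int) × (Int × Int × Int × Int) × (Int × Int × Int × Int)) :
    (Int × Int × Int × Int) × (Int × Int × Int × Int) × (Int × Int × Int × Int) × (Int × Int × Int × Int) :=
  (pvRowMul A.1 B, pvRowMul A.2.1 B, pvRowMul A.2.2.1 B, pvRowMul A.2.2.2 B)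

def pvMatM : (Int × Int × Int × Int) × (Int × Int × Int × Int) × (Int × Int × Int × Int) × (Int × Int × Int × Int) :=
  ((1, 1, 0, 1), (1, 0, 0, 0), (0, 1, 0, 0), (0, 0, 1, 0))

def pvMatI : (Int × Int × Int × Int) × (Int × Int × Int × Int) × (Int × Int × Int × Int) × (Int × Int × Int × Int) :=
  ((1, 0, 0, 0), (0, 1, 0, 0), (0, 0, 1, 0), (0, 0, 0, 1))

-- the while loop of Source B: P accumulates, base squares, k halves
def pvMatLoop (P B : (Int × Int × Int × Int) × (Int × Int × Int × Int) × (Int × Int × Int × Int) × (Int × Int × Int × Int))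
    (k : Nat) :
    (Int × Int × Int × Int) × (Int × Int × Int × Int) × (Int × Int × Int × Int) × (Int × Int × Int × Int) :=
  if h : k = 0 then P
  else pvMatLoop (if k % 2 = 1 then pvMatMul P B else P) (pvMatMul B B) (k / 2)
termination_by k
decreasing_by exact Nat.div_lt_self (Nat.pos_of_ne_zero h) (by omega)

def scoring_optionsDPIterative_alt (n : Int) : Int :=
  if n ≤ 0 then 0
  else if n ≤ 4 then PySem.List.pyGetD [0, 1, 2, 3, 6] n 0
  else
    let P := pvMatLoop pvMatI pvMatM (n - 4).toNat
    pvDot P.1 (6, 3, 2, 1)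

-- ===== PRECONDITION & SPEC =====
def Spec_scoring_optionsDPIterative (n : Int) (out : Int) : Prop := out = scoring_optionsDPIterative_alt n
instance (n : Int) (out : Int) : Decidable (Spec_scoring_optionsDPIterative n out) := by unfold Spec_scoring_optionsDPIterative; infer_instance

-- ===== CLAIM (what is proved, stated in full; the proofs are below) =====
def Claim_equal_scoring_optionsDPIterative : Prop := ∀ (n : Int), Dom_scoring_optionsDPIterative n → Spec_scoring_optionsDPIterative n (scoring_optionsDPIterative n)

-- ===== LEMMAS AND PROOFS =====

-- the mathematical sequence: A's table values
def pvF : Nat → Int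
  | 0 => 0
  | 1 => 1
  | 2 => 2
  | 3 => 3
  | 4 => 6
  | (k + 5) => pvF (k + 4) + pvF (k + 3) + pvF (k + 1)

def pvPow (B : (Int × Int × Int × Int) × (Int × Int × Int × Int) × (Int × Int × Int × Int) × (Int × Int × Int × Int)) :
    Nat → (Int × Int × Int × Int) × (Int × Int × Int × Int) × (Int × Int × Int × Int) × (Int × Int × Int × Int)
  | 0 => pvMatI
  | (k + 1) => pvMatMul (pvPow B k) B

def pvMulVec (A : (Int × Int × Int × Int) × (Int × Int × Int × Int) × (Int × Int × Int × Int) × (Int × Int × Int × Int))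
    (v : Int × Int × Int × Int) : Int × Int × Int × Int :=
  (pvDot A.1 v, pvDot A.2.1 v, pvDot A.2.2.1 v, pvDot A.2.2.2 v)

theorem pvMatMul_id_left (A : (Int × Int × Int × Int) × (Int × Int × Int × Int) × (Int × Int × Int × Int) × (Int × Int × Int × Int)) :
    pvMatMul pvMatI A = A := by
  obtain ⟨⟨a, b, c, d⟩, ⟨e, f, g, h⟩, ⟨i, j, k, l⟩, ⟨m, o, p, q⟩⟩ := A
  simp [pvMatMul, pvRowMul, pvMatI]

theorem pvMatMul_id_right (A : (Int × Int × Int × Int) × (Int × Int × Int × Int) × (Int × Int × Int × Int) × (Int × Int × Int × Int)) :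
    pvMatMul A pvMatI = A := by
  obtain ⟨⟨a, b, c, d⟩, ⟨e, f, g, h⟩, ⟨i, j, k, l⟩, ⟨m, o, p, q⟩⟩ := A
  simp [pvMatMul, pvRowMul, pvMatI]

theorem pvMatMul_assoc (A B C : (Int × Int × Int × Int) × (Int × Int × Int × Int) × (Int × Int × Int × Int) × (Int × Int × Int × Int)) :
    pvMatMul (pvMatMul A B) C = pvMatMul A (pvMatMul B C) := by
  obtain ⟨⟨a00, a01, a02, a03⟩, ⟨a10, a11, a12, a13⟩, ⟨a20, a21, a22, a23⟩, ⟨a30, a31, a32, a33⟩⟩ := A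
  obtain ⟨⟨b00, b01, b02, b03⟩, ⟨b10, b11, b12, b13⟩, ⟨b20, b21, b22, b23⟩, ⟨b30, b31, b32, b33⟩⟩ := B
  obtain ⟨⟨c00, c01, c02, c03⟩, ⟨c10, c11, c12, c13⟩, ⟨c20, c21, c22, c23⟩, ⟨c30, c31, c32, c33⟩⟩ := C
  simp only [pvMatMul, pvRowMul, Prod.mk.injEq]
  and_intros <;> ring

theorem pvMul_pvPow (B : (Int × Int × Int × Int) × (Int × Int × Int × Int) × (Int × Int × Int × Int) × (Int × Int × Int × Int)) (k : Nat) :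
    pvMatMul B (pvPow B k) = pvPow B (k + 1) := by
  induction k with
  | zero => simp [pvPow, pvMatMul_id_left, pvMatMul_id_right]
  | succ m ih =>
      show pvMatMul B (pvMatMul (pvPow B m) B) = pvMatMul (pvPow B (m + 1)) B
      rw [← pvMatMul_assoc, ih]

theorem pvPow_double (B : (Int × Int × Int × Int) × (Int × Int × Int × Int) × (Int × Int × Int × Int) × (Int × Int × Int × Int)) (m : Nat) :
    pvPow (pvMatMul B B) m = pvPow B (2 * m) := by
  induction m with
  | zero => rfl
  | succ k ih =>
      show pvMatMul (pvPow (pvMatMul B B) k) (pvMatMul B B) = pvPow B (2 * (k + 1))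
      have h2 : 2 * (k + 1) = 2 * k + 1 + 1 := by omega
      rw [ih, ← pvMatMul_assoc, h2]
      rfl

theorem pvMatLoop_eq (k : Nat) :
    ∀ P B, pvMatLoop P B k = pvMatMul P (pvPow B k) := by
  induction k using Nat.strong_induction_on with
  | _ k ih =>
    intro P B
    by_cases h : k = 0
    · subst h; rw [pvMatLoop]; simp [pvPow, pvMatMul_id_right]
    · rw [pvMatLoop, dif_neg h]
      rw [ih (k / 2) (Nat.div_lt_self (Nat.pos_of_ne_zero h) (by omega)), pvPow_double]
      by_cases hodd : k % 2 = 1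
      · have h2 : 2 * (k / 2) + 1 = k := by omega
        rw [if_pos hodd, pvMatMul_assoc, pvMul_pvPow, h2]
      · have h2 : 2 * (k / 2) = k := by omega
        rw [if_neg hodd, h2]

theorem pvMulVec_mulMat (A B : (Int × Int × Int × Int) × (Int × Int × Int × Int) × (Int × Int × Int × Int) × (Int × Int × Int × Int))
    (v : Int × Int × Int × Int) :
    pvMulVec (pvMatMul A B) v = pvMulVec A (pvMulVec B v) := by
  obtain ⟨⟨a00, a01, a02, a03⟩, ⟨a10, a11, a12, a13⟩, ⟨a20, a21, a22, a23⟩, ⟨a30, a31, a32, a33⟩⟩ := A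
  obtain ⟨⟨b00, b01, b02, b03⟩, ⟨b10, b11, b12, b13⟩, ⟨b20, b21, b22, b23⟩, ⟨b30, b31, b32, b33⟩⟩ := B
  obtain ⟨x, y, z, w⟩ := v
  simp only [pvMulVec, pvMatMul, pvRowMul, pvDot, Prod.mk.injEq]
  and_intros <;> ring

theorem pvMulVec_M (j : Nat) :
    pvMulVec pvMatM (pvF (j + 4), pvF (j + 3), pvF (j + 2), pvF (j + 1)) =
      (pvF (j + 5), pvF (j + 4), pvF (j + 3), pvF (j + 2)) := by
  simp [pvMulVec, pvMatM, pvDot, pvF]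

theorem pvPow_vec (k : Nat) : ∀ j : Nat,
    pvMulVec (pvPow pvMatM k) (pvF (j + 4), pvF (j + 3), pvF (j + 2), pvF (j + 1)) =
      (pvF (j + k + 4), pvF (j + k + 3), pvF (j + k + 2), pvF (j + k + 1)) := by
  induction k with
  | zero =>
      intro j
      simp [pvPow, pvMulVec, pvMatI, pvDot]
  | succ m ih =>
      intro j
      rw [← pvMul_pvPow, pvMulVec_mulMat, ih j, pvMulVec_M (j + m)]
      rfl

-- B's value for n ≥ 5
theorem alt_eq_pvF (m : Nat) (hm : 5 ≤ m) :
    scoring_optionsDPIterative_alt (m : Int) = pvF m := by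
  unfold scoring_optionsDPIterative_alt
  have h0 : ¬ ((m : Int) ≤ 0) := by omega
  have h4 : ¬ ((m : Int) ≤ 4) := by omega
  simp only [h0, h4]
  have hk : ((m : Int) - 4).toNat = m - 4 := by omega
  rw [hk, pvMatLoop_eq, pvMatMul_id_left]
  have hv : ((6 : Int), (3 : Int), (2 : Int), (1 : Int)) =
      (pvF (0 + 4), pvF (0 + 3), pvF (0 + 2), pvF (0 + 1)) := by simp [pvF]
  have := pvPow_vec (m - 4) 0
  rw [hv]
  have hdot : ∀ (P : (Int × Int × Int × Int) × (Int × Int × Int × Int) × (Int × Int × Int × Int) × (Int × Int × Int × Int))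
      (v : Int × Int × Int × Int), pvDot P.1 v = (pvMulVec P v).1 := fun _ _ => rfl
  rw [hdot, this]
  show pvF (0 + (m - 4) + 4) = pvF m
  have he : 0 + (m - 4) + 4 = m := by omega
  rw [he]

-- the loop invariant for A: after processing range(5, m+1) the list is [f 0, …, f m]
theorem loopA_eq (m : Nat) (hm : 4 ≤ m) :
    (PySem.List.pyRange 5 ((m : Int) + 1) 1).foldl
      (fun res i =>
        res ++ [PySem.List.pyGetD res (i - 4) 0 + PySem.List.pyGetD res (i - 2) 0 +
                PySem.List.pyGetD res (i - 1) 0]) [0, 1, 2, 3, 6] =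
      (List.range (m + 1)).map pvF := by
  induction m with
  | zero => omega
  | succ m ih =>
    by_cases h4 : 4 ≤ m
    · have hsplit : PySem.List.pyRange 5 ((m : Int) + 1 + 1) 1 =
          PySem.List.pyRange 5 ((m : Int) + 1) 1 ++ [(m : Int) + 1] := by
        rw [PySem.List.pyRange_one_succ_right (by omega : (5 : Int) ≤ (m : Int) + 1)]
      have hcast : ((m + 1 : Nat) : Int) + 1 = (m : Int) + 1 + 1 := by push_cast; ring
      rw [hcast, hsplit, List.foldl_append, ih h4]
      simp only [List.foldl_cons, List.foldl_nil]
      have hlen : ((List.range (m + 1)).map pvF).length = m + 1 := by simp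
      have hidx : ∀ (k : Nat), k < m + 1 →
          PySem.List.pyGetD ((List.range (m + 1)).map pvF) ((k : Nat) : Int) 0 = pvF k := by
        intro k hk
        rw [PySem.List.pyGetD_natCast]
        simp [List.getD, hk]
      have e1 : (m : Int) + 1 - 4 = ((m - 3 : Nat) : Int) := by omega
      have e2 : (m : Int) + 1 - 2 = ((m - 1 : Nat) : Int) := by omega
      have e3 : (m : Int) + 1 - 1 = ((m : Nat) : Int) := by omega
      rw [e1, e2, e3, hidx (m - 3) (by omega), hidx (m - 1) (by omega), hidx m (by omega)]
      have hrec : pvF (m - 3) + pvF (m - 1) + pvF m = pvF (m + 1) := by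
        have h5 : m + 1 = (m - 4) + 5 := by omega
        have e4 : (m - 4) + 4 = m := by omega
        have e5 : (m - 4) + 3 = m - 1 := by omega
        have e6 : (m - 4) + 1 = m - 3 := by omega
        rw [h5, pvF, e4, e5, e6]
        ring
      rw [hrec, List.range_succ (n := m + 1)]
      simp
    · have hm4 : m = 3 := by omega
      subst hm4
      decide

theorem a_eq_pvF (m : Nat) (hm : 5 ≤ m) :
    scoring_optionsDPIterative (m : Int) = pvF m := by
  unfold scoring_optionsDPIterative
  have h0 : ¬ ((m : Int) ≤ 0) := by omega
  have h4 : ¬ ((m : Int) ≤ 4) := by omega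
  simp only [h0, h4]
  rw [loopA_eq m (by omega)]
  rw [List.range_succ, List.map_append]
  simp [PySem.List.pyGetD_neg_one_append_singleton]

-- ===== VERDICT (by name: the statement is the Claim_ definition above) =====
theorem scoring_optionsDPIterative_spec : Claim_equal_scoring_optionsDPIterative := by
  intro n _
  unfold Spec_scoring_optionsDPIterative
  by_cases h0 : n ≤ 0
  · simp [scoring_optionsDPIterative, scoring_optionsDPIterative_alt, h0]
  · by_cases h4 : n ≤ 4
    · simp [scoring_optionsDPIterative, scoring_optionsDPIterative_alt, h0, h4]
    · have hm : n = ((n.toNat : Nat) : Int) := by omega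
      have hge : 5 ≤ n.toNat := by omega
      rw [hm, a_eq_pvF n.toNat hge, alt_eq_pvF n.toNat hge]
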